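-- pv_equiv track=rewrite | github.com/TriG-Tbh/trig-tbh.github.io | python/2020-05-22_Connect_The_Dots/functions.py | createboard
-- ===== SOURCE A (Python) =====
-- dot = "■"
--
-- def createboard(x, y):
--     line = dot*x
--     line = [c for c in " ".join(line)]
--     board = []
--     for _ in range(y):
--         board.append(line.copy())
--         space = " " * len(line)
--         board.append([c for c in space].copy())
--     board = board[:-1]
--     return board
-- ===== SOURCE B (Python) =====
-- def createboard(x, y):
--     width = max(0, 2 * x - 1)
--     rows = max(0, 2 * y - 1)
--     return [
--         ["■" if j % 2 == 0 else " " for j in range(width)]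
--         if i % 2 == 0 else [" "] * width
--         for i in range(rows)
--     ]
-- ===== Notes on version B (the rewrite author's own statement) =====
-- stated objective: simpler
-- what changed: B computes the board dimensions (width 2x-1, rows 2y-1) in closed form and generates each row directly from its index parity, instead of A's build-a-joined-string, append-two-rows-per-iteration loop followed by a slice that trims the trailing space row.
import Mathlib
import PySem

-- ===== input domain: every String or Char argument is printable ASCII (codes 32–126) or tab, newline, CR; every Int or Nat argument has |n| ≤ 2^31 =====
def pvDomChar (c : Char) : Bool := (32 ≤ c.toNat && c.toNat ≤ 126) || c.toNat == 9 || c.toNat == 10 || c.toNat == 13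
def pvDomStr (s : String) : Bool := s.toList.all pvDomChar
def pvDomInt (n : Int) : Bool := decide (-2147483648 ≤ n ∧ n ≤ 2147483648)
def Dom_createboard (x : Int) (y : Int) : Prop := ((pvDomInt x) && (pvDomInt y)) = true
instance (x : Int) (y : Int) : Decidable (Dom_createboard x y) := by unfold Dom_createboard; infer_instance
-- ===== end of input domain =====

-- B builds each row directly from its index parity with closed-form dimensions,
-- instead of A's join-into-string, two-appends-per-iteration loop plus trailing trim (objective: simpler).

-- ===== PORT A =====
def createboard (x : Int) (y : Int) : List (List String) :=
  -- line = dot*x  (empty for x ≤ 0, exactly as Python's string repetition)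
  let line0 : List Char := List.replicate x.toNat '■'
  -- line = [c for c in " ".join(line)]
  let line : List String := (List.intersperse ' ' line0).map (fun c => String.mk [c])
  -- for _ in range(y): board.append(line.copy()); board.append([c for c in " "*len(line)].copy())
  let board := (List.range y.toNat).foldl
    (fun b _ => (b ++ [line]) ++ [List.replicate line.length " "]) ([] : List (List String))
  -- board[:-1]
  board.dropLast

-- ===== PORT B =====
def createboard_alt (x : Int) (y : Int) : List (List String) :=
  let width := (max 0 (2 * x - 1)).toNat
  let rows := (max 0 (2 * y - 1)).toNat
  (List.range rows).map (fun i =>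
    if i % 2 == 0 then (List.range width).map (fun j => if j % 2 == 0 then "■" else " ")
    else List.replicate width " ")

-- ===== PRECONDITION & SPEC =====
def Spec_createboard (x : Int) (y : Int) (out : List (List String)) : Prop := out = createboard_alt x y
instance (x : Int) (y : Int) (out : List (List String)) : Decidable (Spec_createboard x y out) := by unfold Spec_createboard; infer_instance

-- ===== CLAIM (what is proved, stated in full; the proofs are below) =====
def Claim_equal_createboard : Prop := ∀ (x : Int) (y : Int), Dom_createboard x y → Spec_createboard x y (createboard x y)

-- ===== LEMMAS AND PROOFS =====

-- A's dot row, as a function of x.toNat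
def aline (m : Nat) : List String :=
  (List.intersperse ' ' (List.replicate m '■')).map (fun c => String.mk [c])

-- B's dot row, as a function of the width
def brow (w : Nat) : List String :=
  (List.range w).map (fun j => if j % 2 == 0 then "■" else " ")

-- canonical alternating board with 2n+1 rows, starting and ending with d
def mkb (d s : List String) : Nat → List (List String)
  | 0 => [d]
  | n + 1 => d :: s :: mkb d s n

theorem range_add_two (w : Nat) :
    List.range (w + 2) = 0 :: 1 :: (List.range w).map (· + 2) := by
  rw [List.range_succ_eq_map, List.range_succ_eq_map, List.map_cons, List.map_map]
  rfl

theorem map_parity {α : Type} (f : Nat → α) (hf : ∀ j, f (j + 2) = f j) (w : Nat) :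
    (List.range (w + 2)).map f = f 0 :: f 1 :: (List.range w).map f := by
  rw [range_add_two, List.map_cons, List.map_cons, List.map_map]
  congr 1; congr 1
  exact List.map_congr_left (fun j _ => hf j)

theorem brow_add_two (w : Nat) : brow (w + 2) = "■" :: " " :: brow w := by
  unfold brow
  exact map_parity _ (fun j => by simp [Nat.add_mod_right]) w

theorem aline_succ_eq_brow (m : Nat) : aline (m + 1) = brow (2 * m + 1) := by
  induction m with
  | zero => decide
  | succ k ih =>
      have h1 : aline (k + 2) = "■" :: " " :: aline (k + 1) := by
        simp only [aline, List.replicate_succ, List.intersperse_cons₂, List.map_cons]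
        rfl
      have h2 : 2 * (k + 1) + 1 = 2 * k + 1 + 2 := by omega
      rw [h1, ih, h2, brow_add_two]

theorem aline_eq_brow (m : Nat) : aline m = brow (2 * m - 1) := by
  cases m with
  | zero => decide
  | succ k =>
      have : 2 * (k + 1) - 1 = 2 * k + 1 := by omega
      rw [this]; exact aline_succ_eq_brow k

theorem aline_length (m : Nat) : (aline m).length = 2 * m - 1 := by
  simp [aline, List.length_intersperse]

theorem mkb_concat (d s : List String) (n : Nat) :
    mkb d s n ++ [s, d] = d :: s :: mkb d s n := by
  induction n with
  | zero => rfl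
  | succ k ih => simp only [mkb, List.cons_append, ih]

theorem foldA (d s : List String) (n : Nat) :
    (List.range (n + 1)).foldl (fun b _ => (b ++ [d]) ++ [s]) ([] : List (List String))
      = mkb d s n ++ [s] := by
  induction n with
  | zero => rfl
  | succ k ih =>
      rw [List.range_succ, List.foldl_append, ih]
      simp only [List.foldl_cons, List.foldl_nil, List.append_assoc]
      rw [show mkb d s (k + 1) = d :: s :: mkb d s k from rfl, ← mkb_concat]
      simp

theorem bRows (w k : Nat) :
    (List.range (2 * k + 1)).map
        (fun i => if i % 2 == 0 then brow w else List.replicate w " ")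
      = mkb (brow w) (List.replicate w " ") k := by
  induction k with
  | zero => simp [mkb, List.range_succ]
  | succ n ih =>
      have h2 : 2 * (n + 1) + 1 = 2 * n + 1 + 2 := by omega
      rw [h2, map_parity _ (fun j => by simp [Nat.add_mod_right]), ih]
      rfl

theorem createboard_eq (x y : Int) :
    createboard x y =
      ((List.range y.toNat).foldl
        (fun b _ => (b ++ [aline x.toNat]) ++ [List.replicate (aline x.toNat).length " "])
        []).dropLast := rfl

theorem createboard_alt_eq (x y : Int) :
    createboard_alt x y =
      (List.range ((max 0 (2 * y - 1)).toNat)).map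
        (fun i => if i % 2 == 0 then brow ((max 0 (2 * x - 1)).toNat)
                  else List.replicate ((max 0 (2 * x - 1)).toNat) " ") := rfl

-- ===== VERDICT (by name: the statement is the Claim_ definition above) =====
theorem createboard_spec : Claim_equal_createboard := by
  intro x y _
  unfold Spec_createboard
  rw [createboard_eq, createboard_alt_eq]
  have hw : (max 0 (2 * x - 1)).toNat = 2 * x.toNat - 1 := by omega
  have hs : List.replicate (aline x.toNat).length (" " : String)
      = List.replicate ((max 0 (2 * x - 1)).toNat) " " := by
    rw [aline_length, hw]
  cases hn : y.toNat with
  | zero =>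
      have h0 : (max 0 (2 * y - 1)).toNat = 0 := by omega
      rw [h0]
      rfl
  | succ k =>
      have hr : (max 0 (2 * y - 1)).toNat = 2 * k + 1 := by omega
      rw [hr]
      rw [foldA, List.dropLast_concat, bRows, hs, aline_eq_brow, hw]
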